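-- pv_equiv track=rewrite | github.com/ApoloSG/ApoloPrivate | Estatistica/primeira_parte.py | counters
-- ===== SOURCE A (Python) =====
-- def counters(mylist:list):
--     Sn = 0
--     n0 = 0
--     n1 = 1
--
--     for x in mylist:
--         if x == 0:
--             n0 += 1
--             Sn += -1
--         else:
--             n1 += 1
--             Sn += 1
--
--     return [n0, n1, Sn, len(mylist)]
-- ===== SOURCE B (Python) =====
-- def counters(mylist: list):
--     n = len(mylist)
--     z = mylist.count(0)
--     return [z, n - z + 1, n - 2 * z, n]
-- ===== Notes on version B (the rewrite author's own statement) =====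
-- stated objective: faster
-- what changed: Replaces the interpreted accumulator loop with len() and the C-implemented count(0), deriving all four slots arithmetically (non-zeros = n - z, so n1 = n - z + 1 and Sn = n - 2z), preserving A's n1-starts-at-1 behaviour.
import Mathlib
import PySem

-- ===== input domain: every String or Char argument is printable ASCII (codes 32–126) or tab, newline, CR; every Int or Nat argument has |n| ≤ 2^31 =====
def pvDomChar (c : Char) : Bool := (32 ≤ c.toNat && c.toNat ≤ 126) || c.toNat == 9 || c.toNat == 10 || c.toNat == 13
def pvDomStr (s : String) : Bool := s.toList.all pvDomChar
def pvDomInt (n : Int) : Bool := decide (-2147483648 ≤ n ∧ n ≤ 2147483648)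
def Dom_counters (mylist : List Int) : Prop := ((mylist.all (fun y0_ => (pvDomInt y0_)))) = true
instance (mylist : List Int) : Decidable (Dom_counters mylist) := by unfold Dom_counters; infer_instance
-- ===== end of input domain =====

-- B replaces A's three-accumulator loop by len + count(0) and arithmetic (simpler; same behaviour incl. n1 starting at 1).

-- ===== PORT A =====
-- state = (Sn, n0, n1), updated per element exactly as A's loop
def counters (mylist : List Int) : List Int :=
  let st := mylist.foldl
    (fun (st : Int × Int × Int) x =>
      if x = 0 then (st.1 - 1, st.2.1 + 1, st.2.2)
      else (st.1 + 1, st.2.1, st.2.2 + 1))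
    (0, 0, 1)
  [st.2.1, st.2.2, st.1, (mylist.length : Int)]

-- ===== PORT B =====
def counters_alt (mylist : List Int) : List Int :=
  let n : Int := mylist.length
  let z : Int := PySem.List.count mylist 0
  [z, n - z + 1, n - 2 * z, n]

-- ===== PRECONDITION & SPEC =====
def Spec_counters (mylist : List Int) (out : List Int) : Prop := out = counters_alt mylist
instance (mylist : List Int) (out : List Int) : Decidable (Spec_counters mylist out) := by unfold Spec_counters; infer_instance

-- ===== CLAIM (what is proved, stated in full; the proofs are below) =====
def Claim_equal_counters : Prop := ∀ (mylist : List Int), Dom_counters mylist → Spec_counters mylist (counters mylist)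

-- ===== LEMMAS AND PROOFS =====
lemma counters_fold_eq (mylist : List Int) (s0 n0 n1 : Int) :
    mylist.foldl
      (fun (st : Int × Int × Int) x =>
        if x = 0 then (st.1 - 1, st.2.1 + 1, st.2.2)
        else (st.1 + 1, st.2.1, st.2.2 + 1))
      (s0, n0, n1)
    = (s0 + (mylist.length : Int) - 2 * PySem.List.count mylist 0,
       n0 + PySem.List.count mylist 0,
       n1 + (mylist.length : Int) - PySem.List.count mylist 0) := by
  induction mylist generalizing s0 n0 n1 with
  | nil => simp [PySem.List.count]
  | cons x xs ih =>
      by_cases hx : x = 0 <;>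
        simp [hx, ih, PySem.List.count, Prod.ext_iff] <;>
        push_cast <;> omega

-- ===== VERDICT (by name: the statement is the Claim_ definition above) =====
theorem counters_spec : Claim_equal_counters := by
  intro mylist _
  show _ = _
  simp [counters, counters_alt, counters_fold_eq]
  push_cast
  omega
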